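-- pv_equiv track=rewrite | github.com/Wfelipetm/Python_D50 | 029.py | CensuraTexto
-- ===== SOURCE A (Python) =====
-- def EhVogal(letra):
--     return letra in ['a', 'e', 'i', 'o', 'u', 'A', 'E', 'I', 'O', 'U']
--
-- def CensuraTexto(texto):
--     textoCensurado = ""
--     vogais = ""
--     for i in range(len(texto)):
--         if EhVogal(texto[i]):
--             textoCensurado += '*'
--             vogais += texto[i]
--         else:
--             textoCensurado += texto[i]
--     return textoCensurado, vogais
-- ===== SOURCE B (Python) =====
-- VOWELS = set('aeiouAEIOU')
--
-- def CensuraTexto(texto):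
--     censurado = ''.join('*' if c in VOWELS else c for c in texto)
--     vogais = ''.join(c for c in texto if c in VOWELS)
--     return censurado, vogais
-- ===== Notes on version B (the rewrite author's own statement) =====
-- stated objective: simpler
-- what changed: Replaces the single interleaved loop that grows two strings by repeated concatenation with two independent passes: a join over a map producing the censored text and a join over a filter collecting the vowels.
import Mathlib
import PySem

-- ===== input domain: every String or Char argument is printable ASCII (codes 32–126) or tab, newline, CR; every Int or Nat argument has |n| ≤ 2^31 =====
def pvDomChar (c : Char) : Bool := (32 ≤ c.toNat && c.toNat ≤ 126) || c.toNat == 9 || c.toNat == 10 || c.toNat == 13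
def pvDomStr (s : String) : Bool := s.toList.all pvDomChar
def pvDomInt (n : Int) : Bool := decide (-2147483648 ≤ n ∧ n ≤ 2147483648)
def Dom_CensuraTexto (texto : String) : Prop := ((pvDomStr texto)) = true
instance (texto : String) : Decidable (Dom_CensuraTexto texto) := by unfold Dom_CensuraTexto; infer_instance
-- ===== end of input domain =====

-- B replaces A's single interleaved accumulating loop with two independent passes (a map and a filter); objective: simpler.


-- ===== PORT A =====
def EhVogal (letra : Char) : Bool :=
  ['a', 'e', 'i', 'o', 'u', 'A', 'E', 'I', 'O', 'U'].contains letra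

-- A: one loop over the characters, growing both strings by concatenation.
def CensuraTexto (texto : String) : String × String :=
  let st := texto.toList.foldl
    (fun (acc : List Char × List Char) c =>
      if EhVogal c then (acc.1 ++ ['*'], acc.2 ++ [c])
      else (acc.1 ++ [c], acc.2))
    ([], [])
  (String.mk st.1, String.mk st.2)

-- ===== PORT B =====
def pvVowels : List Char := "aeiouAEIOU".toList

-- B: two independent passes, a map and a filter.
def CensuraTexto_alt (texto : String) : String × String :=
  (String.mk (texto.toList.map (fun c => if pvVowels.contains c then '*' else c)),
   String.mk (texto.toList.filter (fun c => pvVowels.contains c)))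

-- ===== PRECONDITION & SPEC =====
def Spec_CensuraTexto (texto : String) (out : String × String) : Prop := out = CensuraTexto_alt texto
instance (texto : String) (out : String × String) : Decidable (Spec_CensuraTexto texto out) := by unfold Spec_CensuraTexto; infer_instance

-- ===== CLAIM (what is proved, stated in full; the proofs are below) =====
def Claim_equal_CensuraTexto : Prop := ∀ (texto : String), Dom_CensuraTexto texto → Spec_CensuraTexto texto (CensuraTexto texto)

-- ===== LEMMAS AND PROOFS =====
theorem pvVowels_eq (c : Char) : pvVowels.contains c = EhVogal c := rfl

theorem censura_fold (l a b : List Char) :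
    l.foldl
      (fun (acc : List Char × List Char) c =>
        if EhVogal c then (acc.1 ++ ['*'], acc.2 ++ [c])
        else (acc.1 ++ [c], acc.2))
      (a, b)
    = (a ++ l.map (fun c => if EhVogal c then '*' else c),
       b ++ l.filter (fun c => EhVogal c)) := by
  induction l generalizing a b with
  | nil => simp
  | cons c l ih =>
    by_cases h : EhVogal c = true <;>
      simp [List.foldl, h, ih, List.filter]

-- ===== VERDICT (by name: the statement is the Claim_ definition above) =====
theorem CensuraTexto_spec : Claim_equal_CensuraTexto := by
  intro texto _
  unfold Spec_CensuraTexto CensuraTexto CensuraTexto_alt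
  simp only [censura_fold, pvVowels_eq, List.nil_append]
  rfl
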